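-- pv_equiv track=rewrite | github.com/blacksnk7/VTM | VTM_Experience_Calculator.py | calculate_disciplines
-- ===== SOURCE A (Python) =====
-- def calculate_disciplines(clan, old, new):
--     if (old == 0):
--         total = 10
--     else:
--         total = 0
--     if (new > 1):
--         times = new - old
--         if (clan):
--             for n in range (times):
--                 total += 5 * (old + n)
--         else:
--             for n in range (times):
--                 total += 7 * (old + n)
--     return total
-- ===== SOURCE B (Python) =====
-- def calculate_disciplines(clan, old, new):
--     base = 10 if old == 0 else 0
--     if new <= 1:
--         return base
--     times = new - old
--     if times <= 0:
--         return base
--     coeff = 5 if clan else 7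
--     return base + coeff * (times * old + times * (times - 1) // 2)
-- ===== Notes on version B (the rewrite author's own statement) =====
-- stated objective: faster
-- what changed: Replaces the per-level accumulation loop with the arithmetic-series closed form coeff*(times*old + times*(times-1)//2).
import Mathlib
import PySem

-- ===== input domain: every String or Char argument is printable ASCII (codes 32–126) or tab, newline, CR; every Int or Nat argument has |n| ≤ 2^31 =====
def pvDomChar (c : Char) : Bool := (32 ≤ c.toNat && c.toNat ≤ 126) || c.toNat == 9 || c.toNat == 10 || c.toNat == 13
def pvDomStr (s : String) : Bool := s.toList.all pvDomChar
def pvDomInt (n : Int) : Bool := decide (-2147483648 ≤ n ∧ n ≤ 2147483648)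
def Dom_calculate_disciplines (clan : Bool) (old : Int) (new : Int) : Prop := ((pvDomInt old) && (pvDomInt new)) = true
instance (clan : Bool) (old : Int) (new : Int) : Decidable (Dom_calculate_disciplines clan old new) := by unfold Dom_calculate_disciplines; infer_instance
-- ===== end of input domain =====

-- B replaces the per-level accumulation loop with the arithmetic-series closed form (faster: O(1) vs O(new-old)).


-- ===== PORT A =====
def calculate_disciplines (clan : Bool) (old : Int) (new : Int) : Int :=
  let total : Int := if old = 0 then 10 else 0
  if new > 1 then
    let times := new - old
    if clan then
      (PySem.List.pyRange 0 times 1).foldl (fun total n => total + 5 * (old + n)) total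
    else
      (PySem.List.pyRange 0 times 1).foldl (fun total n => total + 7 * (old + n)) total
  else total

-- ===== PORT B =====
def calculate_disciplines_alt (clan : Bool) (old : Int) (new : Int) : Int :=
  let base : Int := if old = 0 then 10 else 0
  if new ≤ 1 then base
  else
    let times := new - old
    if times ≤ 0 then base
    else
      let coeff : Int := if clan then 5 else 7
      base + coeff * (times * old + PySem.Int.floordiv (times * (times - 1)) 2)

-- ===== PRECONDITION & SPEC =====
def Spec_calculate_disciplines (clan : Bool) (old : Int) (new : Int) (out : Int) : Prop := out = calculate_disciplines_alt clan old new
instance (clan : Bool) (old : Int) (new : Int) (out : Int) : Decidable (Spec_calculate_disciplines clan old new out) := by unfold Spec_calculate_disciplines; infer_instance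

-- ===== CLAIM (what is proved, stated in full; the proofs are below) =====
def Claim_equal_calculate_disciplines : Prop := ∀ (clan : Bool) (old : Int) (new : Int), Dom_calculate_disciplines clan old new → Spec_calculate_disciplines clan old new (calculate_disciplines clan old new)

-- ===== LEMMAS AND PROOFS =====

-- The accumulation loop over range(t) equals the closed arithmetic-series form.
theorem pv_foldl_series (c old : Int) : ∀ (t : Nat) (s : Int),
    ((List.range t).map (fun (k : Nat) => (0 : Int) + (k : Int))).foldl
      (fun total n => total + c * (old + n)) s
    = s + c * ((t : Int) * old + ((t : Int) * ((t : Int) - 1)) / 2) := by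
  intro t
  induction t with
  | zero => intro s; simp
  | succ t ih =>
    intro s
    rw [List.range_succ, List.map_append, List.foldl_append, ih]
    simp only [List.map_cons, List.map_nil, List.foldl_cons, List.foldl_nil]
    have hsq : ((t : Int) + 1) * ((t : Int) + 1 - 1) = (t : Int) * ((t : Int) - 1) + t * 2 := by
      ring
    push_cast
    rw [hsq, Int.add_mul_ediv_right _ _ (by norm_num : (2:Int) ≠ 0)]
    ring

-- ===== VERDICT (by name: the statement is the Claim_ definition above) =====
theorem calculate_disciplines_spec : Claim_equal_calculate_disciplines := by
  intro clan old new _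
  unfold Spec_calculate_disciplines calculate_disciplines calculate_disciplines_alt
  by_cases hnew : new > 1
  · have hnle : ¬ new ≤ 1 := by omega
    simp only [if_pos hnew, if_neg hnle]
    by_cases ht : new - old ≤ 0
    · have hrange : PySem.List.pyRange 0 (new - old) 1 = [] := by
        rw [PySem.List.pyRange_one]
        have h0 : (new - old - 0).toNat = 0 := by omega
        rw [h0]; simp
      rw [if_pos ht, hrange]
      cases clan <;> simp
    · have htpos : 0 < new - old := by omega
      have hcast : ((new - old).toNat : Int) = new - old := by omega
      rw [PySem.List.pyRange_one, if_neg ht,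
        PySem.Int.floordiv_eq_ediv_of_pos (by norm_num : (0:Int) < 2)]
      have h0 : new - old - 0 = new - old := by ring
      rw [h0]
      cases clan <;> simp only [Bool.false_eq_true, if_false, if_true] <;>
        rw [pv_foldl_series, hcast]
  · have hle : new ≤ 1 := by omega
    simp [hnew, hle]
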